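-- pv_equiv track=rewrite | github.com/Param-Bhatt/Bert-Search | ir_assignment.py | build_reference
-- ===== SOURCE A (Python) =====
-- def build_reference(corpus):
--     """
--     Input: Dataset as corpus\n
--     Build reference of each line to email and starting line of the email.\n
--     Output: Reference index from line to email \n
--     """
--     indx_to_email = dict()
--     """Dictionary to refer the corpus line number (l) to the Email number and the fist line number of the email"""
--     l=0
--     for indx_email in range(len(corpus)):
--         start = l
--         for j in range(len(corpus[indx_email])):
--             indx_to_email[l]=(start, indx_email)
--             l+=1
--     return indx_to_email
-- ===== SOURCE B (Python) =====
-- def build_reference(corpus):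
--     # Recursive decomposition: emit each email's block of (line, (start, email)) items,
--     # concatenate the blocks front-to-back, and build the dict once at the end.
--     def go(emails, start, idx):
--         if not emails:
--             return []
--         n = len(emails[0])
--         block = [(start + j, (start, idx)) for j in range(n)]
--         return block + go(emails[1:], start + n, idx + 1)
--     return dict(go(corpus, 0, 0))
-- ===== Notes on version B (the rewrite author's own statement) =====
-- stated objective: alternative
-- what changed: Replaces A's iterative nested loops with a running global line counter and per-line dict insertions by structural recursion on the corpus: each email yields its block of (line,(start,index)) pairs via a range comprehension, blocks are concatenated recursively, and a single dict() call at the end builds the mapping.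
import Mathlib
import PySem

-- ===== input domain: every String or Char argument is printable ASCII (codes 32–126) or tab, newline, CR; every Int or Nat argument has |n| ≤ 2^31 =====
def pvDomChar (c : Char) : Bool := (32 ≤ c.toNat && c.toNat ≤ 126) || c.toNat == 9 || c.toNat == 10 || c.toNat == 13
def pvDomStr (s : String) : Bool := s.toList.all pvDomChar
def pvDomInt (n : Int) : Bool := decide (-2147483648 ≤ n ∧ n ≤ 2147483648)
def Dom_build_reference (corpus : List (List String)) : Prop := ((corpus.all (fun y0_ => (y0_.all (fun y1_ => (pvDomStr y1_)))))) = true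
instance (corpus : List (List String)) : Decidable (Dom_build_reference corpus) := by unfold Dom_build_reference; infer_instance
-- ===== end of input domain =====

-- B replaces A's nested loops with a running counter by structural recursion on the corpus: each email
-- yields its block of pairs via a range comprehension, blocks are concatenated, and dict() is built once
-- at the end; objective: alternative decomposition, same cost.

-- ===== PORT A =====
-- A: dict built by a nested loop with a single global line counter l; returned as its item list.
def build_reference (corpus : List (List String)) : List (Int × Int × Int) :=
  ((PySem.List.enumerate corpus 0).foldl
      (fun (st : PySem.Dict Int (Int × Int) × Int) (p : Int × List String) =>
        p.2.foldl (fun st2 (_ : String) => (st2.1.insert st2.2 (st.2, p.1), st2.2 + 1)) st)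
      (PySem.Dict.empty, 0)).1.items

-- ===== PORT B =====
-- B's inner helper go(emails, start, idx): block comprehension over range(n), then block + recursion.
def pvGo : List (List String) → Int → Int → List (Int × (Int × Int))
  | [], _, _ => []
  | e :: rest, start, idx =>
      ((PySem.List.pyRange 0 e.length 1).map (fun j => (start + j, (start, idx))))
        ++ pvGo rest (start + e.length) (idx + 1)

def build_reference_alt (corpus : List (List String)) : List (Int × Int × Int) :=
  (PySem.Dict.ofList (pvGo corpus 0 0)).items

-- ===== PRECONDITION & SPEC =====
def Spec_build_reference (corpus : List (List String)) (out : List (Int × Int × Int)) : Prop := out = build_reference_alt corpus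
instance (corpus : List (List String)) (out : List (Int × Int × Int)) : Decidable (Spec_build_reference corpus out) := by unfold Spec_build_reference; infer_instance

-- ===== CLAIM (what is proved, stated in full; the proofs are below) =====
def Claim_equal_build_reference : Prop := ∀ (corpus : List (List String)), Dom_build_reference corpus → Spec_build_reference corpus (build_reference corpus)

-- ===== LEMMAS AND PROOFS =====

/-- Common characterisation of both results: for each email a block of (line, start, idx) triples. -/
def pvSpec : List (List String) → Int → Int → List (Int × Int × Int)
  | [], _, _ => []
  | e :: rest, l, i =>
      PySem.List.enumerate (e.map (fun _ => ((l, i) : Int × Int))) l ++ pvSpec rest (l + e.length) (i + 1)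

lemma pvInnerA (e : List String) (v : Int × Int) (d : PySem.Dict Int (Int × Int)) (l : Int)
    (h : ∀ k ∈ d.keys, k < l) :
    (e.foldl (fun st2 (_ : String) => (st2.1.insert st2.2 v, st2.2 + 1)) (d, l)).2 = l + e.length ∧
    (e.foldl (fun st2 (_ : String) => (st2.1.insert st2.2 v, st2.2 + 1)) (d, l)).1.items
      = d.items ++ PySem.List.enumerate (e.map (fun _ => v)) l ∧
    (∀ k ∈ (e.foldl (fun st2 (_ : String) => (st2.1.insert st2.2 v, st2.2 + 1)) (d, l)).1.keys,
      k < (e.foldl (fun st2 (_ : String) => (st2.1.insert st2.2 v, st2.2 + 1)) (d, l)).2) := by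
  induction e generalizing d l with
  | nil => exact ⟨by simp, by simp, h⟩
  | cons s e' ih =>
    have hc : d.contains l = false := by
      cases hc : d.contains l with
      | false => rfl
      | true =>
        have := (PySem.Dict.contains_iff_mem_keys d l).1 hc
        exact absurd (h l this) (lt_irrefl l)
    have h' : ∀ k ∈ (d.insert l v).keys, k < l + 1 := by
      intro k hk
      rcases (PySem.Dict.mem_keys_insert d l k v).1 hk with rfl | hk
      · omega
      · have := h k hk; omega
    obtain ⟨h1, h2, h3⟩ := ih (d.insert l v) (l + 1) h'
    refine ⟨?_, ?_, ?_⟩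
    · simp only [List.foldl_cons] at *
      rw [h1, List.length_cons]; push_cast; omega
    · simp only [List.foldl_cons] at *
      rw [h2, PySem.Dict.items_insert_of_not_contains _ _ hc]
      simp [PySem.List.enumerate_cons]
    · simpa only [List.foldl_cons] using h3

lemma pvOuterA (corpus : List (List String)) (i l : Int) (d : PySem.Dict Int (Int × Int))
    (h : ∀ k ∈ d.keys, k < l) :
    ((PySem.List.enumerate corpus i).foldl
        (fun (st : PySem.Dict Int (Int × Int) × Int) (p : Int × List String) =>
          p.2.foldl (fun st2 (_ : String) => (st2.1.insert st2.2 (st.2, p.1), st2.2 + 1)) st)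
        (d, l)).1.items = d.items ++ pvSpec corpus l i := by
  induction corpus generalizing i l d with
  | nil => simp [PySem.List.enumerate, pvSpec]
  | cons e rest ih =>
    rw [PySem.List.enumerate_cons, List.foldl_cons]
    obtain ⟨h1, h2, h3⟩ := pvInnerA e (l, i) d l h
    set r := e.foldl (fun st2 (_ : String) => (st2.1.insert st2.2 (l, i), st2.2 + 1)) (d, l) with hr
    rw [show r = (r.1, r.2) from rfl] at *
    rw [ih (i + 1) r.2 r.1 h3, h2, h1, pvSpec]
    simp

lemma pvA (corpus : List (List String)) : build_reference corpus = pvSpec corpus 0 0 := by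
  unfold build_reference
  rw [pvOuterA corpus 0 0 PySem.Dict.empty (by simp [PySem.Dict.empty])]
  simp [PySem.Dict.empty]

/-- A comprehension block is an enumeration of a constant list. -/
lemma pvBlock (n : Nat) (v : Int × Int) (l : Int) :
    (PySem.List.pyRange 0 n 1).map (fun j => (l + j, v))
      = PySem.List.enumerate (List.replicate n v) l := by
  induction n generalizing l with
  | zero => simp [PySem.List.pyRange_one_eq_nil]
  | succ m ih =>
    have : ((m + 1 : Nat) : Int) = (m : Int) + 1 := by push_cast; ring
    rw [this, PySem.List.pyRange_one_succ_right (by positivity), List.map_append,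
      List.replicate_succ' , PySem.List.enumerate_append, ih]
    simp

/-- B's recursive item list equals the common characterisation. -/
lemma pvGoEq (corpus : List (List String)) (l i : Int) :
    pvGo corpus l i = pvSpec corpus l i := by
  induction corpus generalizing l i with
  | nil => rfl
  | cons e rest ih =>
    rw [pvGo, pvSpec, ih, pvBlock e.length ((l, i)) l]
    congr 1
    congr 1
    simp [List.map_const']

/-- The keys of B's item list are the contiguous range of line numbers. -/
lemma pvGoKeys (corpus : List (List String)) (l i : Int) :
    (pvGo corpus l i).map Prod.fst
      = PySem.List.pyRange l (l + ((corpus.map List.length).sum : Nat)) 1 := by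
  induction corpus generalizing l i with
  | nil => rw [pvGo, List.map_nil, List.map_nil, List.sum_nil, Nat.cast_zero, add_zero,
      PySem.List.pyRange_one_eq_nil le_rfl]
  | cons e rest ih =>
    rw [pvGo, List.map_append, List.map_map, ih]
    have hmap : (PySem.List.pyRange 0 (e.length : Int) 1).map
        ((Prod.fst ∘ fun j => ((l + j, (l, i)) : Int × Int × Int)))
        = PySem.List.pyRange l (l + (e.length : Int)) 1 := by
      rw [PySem.List.pyRange_one 0 (e.length : Int), PySem.List.pyRange_one l]
      simp [List.map_map, Function.comp]
    rw [hmap]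
    rw [PySem.List.pyRange_one_append l (l + (e.length : Int))
        (l + (((e :: rest).map List.length).sum : Nat)) (by omega)
        (by rw [List.map_cons, List.sum_cons]; omega)]
    congr 2
    simp only [List.map_cons, List.sum_cons]
    push_cast
    ring

lemma pvDictItems (xs : List (Int × (Int × Int))) (h : (xs.map Prod.fst).Nodup) :
    (PySem.Dict.ofList xs).items = xs := by
  show (List.foldl (fun acc p => acc.insert p.1 p.2) PySem.Dict.empty xs).items = _
  rw [PySem.Dict.items_foldl_insert_fresh _ Prod.fst Prod.snd _
      (fun a _ => PySem.Dict.contains_empty _) h]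
  simp [PySem.Dict.empty]

lemma pvB (corpus : List (List String)) : build_reference_alt corpus = pvSpec corpus 0 0 := by
  unfold build_reference_alt
  rw [pvDictItems _ (by rw [pvGoKeys corpus 0 0]; exact PySem.List.nodup_pyRange_one _ _),
    pvGoEq]

-- ===== VERDICT (by name: the statement is the Claim_ definition above) =====
theorem build_reference_spec : Claim_equal_build_reference := by
  intro corpus _
  show build_reference corpus = build_reference_alt corpus
  rw [pvA, pvB]
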